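-- pv_equiv track=rewrite | github.com/Walerider/ISRPO | HACHAPUR.py | check_even_rows_ascending
-- ===== SOURCE A (Python) =====
-- def check_even_rows_ascending(matrix):
--     even_sums = []
--
--     for i in range(0, len(matrix), 2):
--         row_sum = sum(matrix[i])
--         even_sums.append(row_sum)
--
--     for i in range(1, len(even_sums)):
--         if even_sums[i] <= even_sums[i-1]:
--             return False
--
--     return True
-- ===== SOURCE B (Python) =====
-- def check_even_rows_ascending(matrix):
--     prev = None
--     rest = matrix
--     while rest:
--         s = sum(rest[0])
--         if prev is not None and s <= prev:
--             return False
--         prev = s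
--         rest = rest[2:]
--     return True
-- ===== Notes on version B (the rewrite author's own statement) =====
-- stated objective: simpler
-- what changed: Replaces A's two index-driven passes (build a list of even-row sums, then scan adjacent pairs) with a single structural pass over the list that drops two rows at a time and compares each even-row sum against the previously seen one, returning early; no intermediate list and no indexing.
import Mathlib
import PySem

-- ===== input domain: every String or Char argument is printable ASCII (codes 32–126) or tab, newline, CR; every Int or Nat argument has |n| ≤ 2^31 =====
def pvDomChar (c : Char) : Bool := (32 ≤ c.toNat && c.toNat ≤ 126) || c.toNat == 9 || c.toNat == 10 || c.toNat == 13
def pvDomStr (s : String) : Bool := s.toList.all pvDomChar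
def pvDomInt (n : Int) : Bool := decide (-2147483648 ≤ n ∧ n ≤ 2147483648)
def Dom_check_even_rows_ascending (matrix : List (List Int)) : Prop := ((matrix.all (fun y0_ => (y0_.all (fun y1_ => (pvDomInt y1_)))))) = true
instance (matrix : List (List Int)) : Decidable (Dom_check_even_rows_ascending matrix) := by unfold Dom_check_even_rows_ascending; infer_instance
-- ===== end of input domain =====

-- B replaces A's two index-driven passes (build even-row sums, then scan adjacent pairs)
-- with one structural pass that drops two rows at a time and keeps only the previous sum (objective: simpler).


-- ===== PORT A =====
-- sum(row) in Python: left fold of + over the row starting at 0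
def pvSum (r : List Int) : Int := r.foldl (· + ·) 0

-- first loop of A: for i in range(0, len(matrix), 2): even_sums.append(sum(matrix[i]))
-- (matrix[i] is always in range here, so pyGetD with default [] is exact)
def pvEvenSums (matrix : List (List Int)) : List Int :=
  (PySem.List.pyRange 0 matrix.length 2).foldl
    (fun acc i => acc ++ [pvSum (PySem.List.pyGetD matrix i [])]) []

-- second loop of A with its early return False, over range(1, len(even_sums))
-- (both indices i and i-1 are in range, so pyGetD with default 0 is exact)
def pvScanA (es : List Int) : List Int → Bool
  | [] => true
  | i :: is =>
      if PySem.List.pyGetD es i 0 ≤ PySem.List.pyGetD es (i - 1) 0 then false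
      else pvScanA es is

def check_even_rows_ascending (matrix : List (List Int)) : Bool :=
  let even_sums := pvEvenSums matrix
  pvScanA even_sums (PySem.List.pyRange 1 even_sums.length 1)

-- ===== PORT B =====
-- the while loop of B: state (prev, rest); rest[2:] on r :: rest is rest.tail
def pvGoB : Option Int → List (List Int) → Bool
  | _, [] => true
  | prev, r :: rest =>
      let s := pvSum r
      match prev with
      | some p => if s ≤ p then false else pvGoB (some s) rest.tail
      | none => pvGoB (some s) rest.tail
termination_by _ l => l.length
decreasing_by simp [List.length_tail]

def check_even_rows_ascending_alt (matrix : List (List Int)) : Bool :=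
  pvGoB none matrix

-- ===== PRECONDITION & SPEC =====
def Spec_check_even_rows_ascending (matrix : List (List Int)) (out : Bool) : Prop := out = check_even_rows_ascending_alt matrix
instance (matrix : List (List Int)) (out : Bool) : Decidable (Spec_check_even_rows_ascending matrix out) := by unfold Spec_check_even_rows_ascending; infer_instance

-- ===== CLAIM (what is proved, stated in full; the proofs are below) =====
def Claim_equal_check_even_rows_ascending : Prop := ∀ (matrix : List (List Int)), Dom_check_even_rows_ascending matrix → Spec_check_even_rows_ascending matrix (check_even_rows_ascending matrix)

-- ===== LEMMAS AND PROOFS =====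

-- the even-indexed rows, structurally (two at a time)
def pvEo : List (List Int) → List (List Int)
  | [] => []
  | r :: rest => r :: pvEo rest.tail
termination_by l => l.length
decreasing_by simp [List.length_tail]

-- reference form of the adjacent-pair check
def pvChain : List Int → Bool
  | [] => true
  | [_] => true
  | a :: b :: rest => if b ≤ a then false else pvChain (b :: rest)

-- sums-level image of B's loop
def pvGoS : Option Int → List Int → Bool
  | _, [] => true
  | none, s :: rest => pvGoS (some s) rest
  | some p, s :: rest => if s ≤ p then false else pvGoS (some s) rest


-- step-2 range: nil and cons forms (derived from the closed form pyRange_of_pos)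
theorem pvRange_two_nil (a b : Int) (h : b ≤ a) : PySem.List.pyRange a b 2 = [] := by
  rw [PySem.List.pyRange_of_pos _ _ (by norm_num)]
  rw [if_neg (by omega)]
  simp

theorem pvRange_two_cons (a b : Int) (h : a < b) :
    PySem.List.pyRange a b 2 = a :: PySem.List.pyRange (a + 2) b 2 := by
  rw [PySem.List.pyRange_of_pos _ _ (by norm_num), PySem.List.pyRange_of_pos _ _ (by norm_num)]
  rw [if_pos h]
  by_cases h2 : a + 2 < b
  · rw [if_pos h2]
    have hn : ((b - a + 2 - 1) / 2).toNat = ((b - (a + 2) + 2 - 1) / 2).toNat + 1 := by omega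
    rw [hn, List.range_succ_eq_map, List.map_cons, List.map_map]
    refine congrArg₂ _ (by simp) ?_
    refine List.map_congr_left (fun k _ => ?_)
    simp [Function.comp]
    ring
  · rw [if_neg h2]
    have hn : ((b - a + 2 - 1) / 2).toNat = 1 := by omega
    rw [hn]
    simp

-- the even-index loop of A reads exactly the rows pvEo selects
theorem pvMapGet_two : ∀ (xs pre : List (List Int)),
    (PySem.List.pyRange (pre.length : Int) (((pre.length + xs.length : Nat) : Int)) 2).map
      (fun i => PySem.List.pyGetD (pre ++ xs) i []) = pvEo xs := by
  intro xs
  induction xs using pvEo.induct with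
  | case1 =>
    intro pre
    rw [pvRange_two_nil _ _ (by simp)]
    simp [pvEo]
  | case2 r rest ih =>
    intro pre
    rw [pvRange_two_cons _ _ (by simp; try omega), List.map_cons]
    have e1 : PySem.List.pyGetD (pre ++ r :: rest) (pre.length : Int) [] = r := by
      rw [PySem.List.pyGetD_natCast, List.getD_eq_getElem?_getD,
        List.getElem?_append_right (by omega)]
      simp
    rw [e1, pvEo]
    refine congrArg _ ?_
    cases rest with
    | nil =>
      rw [pvRange_two_nil _ _ (by simp; try omega)]
      simp [pvEo]
    | cons s rest' =>
      have := ih ((pre ++ [r, s]))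
      simp only [List.length_append, List.tail_cons] at this ⊢
      have harr : pre ++ [r, s] ++ rest' = pre ++ r :: s :: rest' := by simp
      rw [harr] at this
      convert this using 3 <;> ((try simp); (try omega))

theorem pvEvenSums_eq (matrix : List (List Int)) :
    pvEvenSums matrix = (pvEo matrix).map pvSum := by
  unfold pvEvenSums
  rw [PySem.List.foldl_append_singleton_eq_map
    (fun i => pvSum (PySem.List.pyGetD matrix i [])), List.nil_append,
    show (fun i => pvSum (PySem.List.pyGetD matrix i [])) =
      pvSum ∘ (fun i => PySem.List.pyGetD matrix i []) from rfl, ← List.map_map]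
  refine congrArg _ ?_
  have := pvMapGet_two matrix []
  simpa using this

-- A's second loop, generalized over the scanned prefix
theorem pvScanA_aux : ∀ (l : List Int) (a : Int) (pre : List Int),
    pvScanA (pre ++ a :: l)
      (PySem.List.pyRange ((pre.length : Int) + 1) (((pre.length + 1 + l.length : Nat) : Int)) 1)
      = pvChain (a :: l) := by
  intro l
  induction l with
  | nil =>
    intro a pre
    rw [PySem.List.pyRange_one_eq_nil (by simp)]
    rfl
  | cons b r ih =>
    intro a pre
    rw [PySem.List.pyRange_one_cons (by simp; try omega)]
    have e1 : PySem.List.pyGetD (pre ++ a :: b :: r) ((pre.length : Int) + 1) 0 = b := by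
      have hc : ((pre.length : Int) + 1) = ((pre.length + 1 : Nat) : Int) := by push_cast; ring
      rw [hc, PySem.List.pyGetD_natCast, List.getD_eq_getElem?_getD,
        List.getElem?_append_right (by omega)]
      simp
    have e2 : PySem.List.pyGetD (pre ++ a :: b :: r) ((pre.length : Int) + 1 - 1) 0 = a := by
      have hc : ((pre.length : Int) + 1 - 1) = ((pre.length : Nat) : Int) := by ring
      rw [hc, PySem.List.pyGetD_natCast, List.getD_eq_getElem?_getD,
        List.getElem?_append_right (by omega)]
      simp
    rw [pvScanA, e1, e2, pvChain]
    by_cases hba : b ≤ a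
    · rw [if_pos hba, if_pos hba]
    · rw [if_neg hba, if_neg hba]
      have := ih b (pre ++ [a])
      simp only [List.length_append, List.append_assoc, List.cons_append, List.nil_append] at this
      convert this using 3 <;> ((try simp); (try omega))

theorem pvScanA_eq (es : List Int) :
    pvScanA es (PySem.List.pyRange 1 es.length 1) = pvChain es := by
  cases es with
  | nil =>
    rw [PySem.List.pyRange_one_eq_nil (by simp)]
    rfl
  | cons a l =>
    have := pvScanA_aux l a []
    simp only [List.length_nil, List.nil_append, Nat.cast_zero, zero_add] at this
    convert this using 3 <;> ((try simp); (try omega))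

theorem pvGoB_eq : ∀ (xs : List (List Int)) (prev : Option Int),
    pvGoB prev xs = pvGoS prev ((pvEo xs).map pvSum) := by
  intro xs
  induction xs using pvEo.induct with
  | case1 => intro prev; cases prev <;> simp [pvGoB, pvEo, pvGoS]
  | case2 r rest ih =>
    intro prev
    cases prev with
    | none => simp [pvGoB, pvEo, pvGoS, ih]
    | some p =>
      simp only [pvGoB, pvEo, List.map_cons, pvGoS]
      split
      · rfl
      · exact ih _

theorem pvGoS_some (a : Int) (l : List Int) : pvGoS (some a) l = pvChain (a :: l) := by
  induction l generalizing a with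
  | nil => rfl
  | cons b r ih => simp [pvGoS, pvChain, ih]

theorem pvGoS_none (l : List Int) : pvGoS none l = pvChain l := by
  cases l with
  | nil => rfl
  | cons a r => simpa [pvGoS] using pvGoS_some a r

-- ===== VERDICT (by name: the statement is the Claim_ definition above) =====
theorem check_even_rows_ascending_spec : Claim_equal_check_even_rows_ascending := by
  intro matrix _
  unfold Spec_check_even_rows_ascending check_even_rows_ascending check_even_rows_ascending_alt
  rw [pvGoB_eq, pvGoS_none, pvEvenSums_eq, pvScanA_eq]
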